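-- pv_equiv track=rewrite | github.com/nishio/atcoder | abc172/e.py | blute
-- ===== SOURCE A (Python) =====
-- def blute(N, M):
--     """
--     >>> blute(2, 2)
--     2
--
--     >>> blute(2, 3)
--     18
--     """
--     from itertools import permutations
--     nums = range(M)
--     count = 0
--     for a in permutations(nums, N):
--         for b in permutations(nums, N):
--             if all(a[i] != b[i] for i in range(N)):
--                 count += 1
--     return count
-- ===== SOURCE B (Python) =====
-- def blute(N, M):
--     # Closed form via inclusion-exclusion: P(m,N) choices for a, and for each a
--     # the number of b avoiding it pointwise is sum_k (-1)^k C(N,k) P(m-k,N-k).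
--     m = M if M > 0 else 0
--     if N > m:
--         return 0  # fewer than N distinct values available: no N-permutations at all
--
--     def fall(x, k):
--         # falling factorial x*(x-1)*...*(x-k+1)
--         r = 1
--         for i in range(k):
--             r *= x - i
--         return r
--
--     s = 0
--     for k in range(N + 1):
--         c = fall(N, k) // fall(k, k)  # binomial C(N, k)
--         s += (-1) ** k * c * fall(m - k, N - k)
--     return fall(m, N) * s
-- ===== Notes on version B (the rewrite author's own statement) =====
-- stated objective: alternative
-- what changed: A enumerates every pair of N-permutations of range(M) and tests them pointwise; B computes the same count in closed form as P(m,N) * sum_k (-1)^k C(N,k) P(m-k,N-k) via inclusion-exclusion over the forbidden positions.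
-- crash fix: On N < 0, itertools.permutations makes A raise ValueError, while B's loops are empty and it returns 0. — e.g. on blute(-1, 2): A raises ValueError, B returns 0
import Mathlib
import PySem

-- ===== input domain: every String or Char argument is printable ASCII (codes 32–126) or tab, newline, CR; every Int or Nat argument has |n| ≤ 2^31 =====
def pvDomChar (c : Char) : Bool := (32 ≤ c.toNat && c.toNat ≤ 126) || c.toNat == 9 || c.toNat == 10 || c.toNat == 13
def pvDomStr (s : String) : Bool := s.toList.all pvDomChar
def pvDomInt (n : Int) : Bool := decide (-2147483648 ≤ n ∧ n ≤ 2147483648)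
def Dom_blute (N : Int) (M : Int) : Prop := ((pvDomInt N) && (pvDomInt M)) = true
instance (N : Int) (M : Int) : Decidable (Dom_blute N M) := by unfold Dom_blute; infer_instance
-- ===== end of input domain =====

-- B replaces A's double enumeration of all N-permutation pairs by the
-- inclusion-exclusion closed form P(m,N) * Σ_k (-1)^k C(N,k) P(m-k,N-k)
-- (objective: alternative — a different algorithm for the same count).

-- ===== PORT A =====
-- hand port of itertools.permutations(pool, N): pick each element of the remaining
-- pool in pool order and recurse; for a duplicate-free pool (range(M) here) this is
-- exactly itertools' output order and content.
-- (itertools returns immediately when r > len(pool): 'if r > n: return' in its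
-- documented equivalent code; the guard below is that check)
def pvPerms : List Int → Nat → List (List Int)
  | _, 0 => [[]]
  | pool, n+1 =>
    if pool.length < n+1 then []
    else pool.flatMap fun x => (pvPerms (pool.erase x) n).map (fun p => x :: p)

-- all(a[i] != b[i] for i in range(N)); indices are always in range when called
-- (a, b have length N), so pyGetD with default 0 is exact there.
def pvAllDiff (a b : List Int) (N : Int) : Bool :=
  (PySem.List.pyRange 0 N 1).all fun i =>
    !(PySem.List.pyGetD a i 0 == PySem.List.pyGetD b i 0)

def blute (N : Int) (M : Int) : Int :=
  let nums := PySem.List.pyRange 0 M 1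
  let ps := pvPerms nums N.toNat
  ps.foldl (fun count a =>
    ps.foldl (fun count b =>
      if pvAllDiff a b N then count + 1 else count) count) 0

-- ===== PORT B =====
-- falling factorial x*(x-1)*...*(x-k+1) (Source B's `fall`); (-1) ** k with k ≥ 0
-- inside the loop, so the Nat exponent k.toNat is exact.
def pvFall (x k : Int) : Int :=
  (PySem.List.pyRange 0 k 1).foldl (fun r i => r * (x - i)) 1

def blute_alt (N : Int) (M : Int) : Int :=
  let m := if M > 0 then M else 0
  if N > m then 0
  else
  let s := (PySem.List.pyRange 0 (N+1) 1).foldl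
    (fun s k =>
      s + (-1) ^ k.toNat * PySem.Int.floordiv (pvFall N k) (pvFall k k)
            * pvFall (m - k) (N - k)) 0
  pvFall m N * s

-- ===== PRECONDITION & SPEC =====
-- permutations(nums, N) raises ValueError for N < 0; A returns on every other input.
def Pre_blute (N : Int) (M : Int) : Prop := 0 ≤ N
instance (N : Int) (M : Int) : Decidable (Pre_blute N M) := by unfold Pre_blute; infer_instance
def pvWitness_blute : Int × Int := (2, 3)

-- On N < 0, A raises ValueError (from itertools.permutations) while B returns 0.
def Raises_blute (N : Int) (M : Int) : Prop := N < 0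
instance (N : Int) (M : Int) : Decidable (Raises_blute N M) := by unfold Raises_blute; infer_instance
def pvRaiseWitness_blute : Int × Int := (-1, 2)
def pvRaiseWitnessOut_blute : Int := 0

def Spec_blute (N : Int) (M : Int) (out : Int) : Prop := out = blute_alt N M
instance (N : Int) (M : Int) (out : Int) : Decidable (Spec_blute N M out) := by unfold Spec_blute; infer_instance

-- ===== CLAIM (what is proved, stated in full; the proofs are below) =====
def Claim_equal_blute : Prop := ∀ (N : Int) (M : Int), Dom_blute N M → Pre_blute N M → Spec_blute N M (blute N M)
def Claim_raises_blute : Prop := (∀ (N : Int) (M : Int), Dom_blute N M → Raises_blute N M → ¬ Pre_blute N M) ∧ (Dom_blute (pvRaiseWitness_blute.1) (pvRaiseWitness_blute.2) ∧ Raises_blute (pvRaiseWitness_blute.1) (pvRaiseWitness_blute.2) ∧ blute_alt (pvRaiseWitness_blute.1) (pvRaiseWitness_blute.2) = pvRaiseWitnessOut_blute)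

-- ===== LEMMAS AND PROOFS =====

-- unguarded recursion; equal to pvPerms (the guard only short-cuts an empty result)
def pvPermsR : List Int → Nat → List (List Int)
  | _, 0 => [[]]
  | pool, n+1 => pool.flatMap fun x => (pvPermsR (pool.erase x) n).map (fun p => x :: p)

lemma pvPermsR_nil : ∀ (n : Nat) (pool : List Int), pool.length < n → pvPermsR pool n = [] := by
  intro n
  induction n with
  | zero => intro pool h; omega
  | succ n ih =>
    intro pool h
    rw [pvPermsR]
    apply List.flatMap_eq_nil_iff.mpr
    intro x hx
    have hp : 1 ≤ pool.length := List.length_pos_iff.mpr (List.ne_nil_of_mem hx)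
    have hlt : (pool.erase x).length < n := by
      rw [List.length_erase_of_mem hx]; omega
    rw [ih (pool.erase x) hlt]
    rfl

lemma pvPerms_eq : ∀ (n : Nat) (pool : List Int), pvPerms pool n = pvPermsR pool n := by
  intro n
  induction n with
  | zero => intro pool; rfl
  | succ n ih =>
    intro pool
    by_cases h : pool.length < n+1
    · rw [pvPerms, if_pos h, pvPermsR_nil (n+1) pool h]
    · rw [pvPerms, if_neg h, pvPermsR]
      have : (fun x => (pvPerms (pool.erase x) n).map (fun p => x :: p))
          = (fun x => (pvPermsR (pool.erase x) n).map (fun p => x :: p)) := by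
        funext x; rw [ih]
      rw [this]

def pfall (m : Int) : Nat → Int
  | 0 => 1
  | n+1 => m * pfall (m - 1) n

lemma pfall_eq_prod (n : Nat) : ∀ (m : Int), pfall m n = ∏ i ∈ Finset.range n, (m - i) := by
  induction n with
  | zero => intro m; simp [pfall]
  | succ n ih =>
    intro m
    rw [Finset.prod_range_succ']
    simp only [pfall, ih (m-1)]
    rw [mul_comm]
    congr 1
    · apply Finset.prod_congr rfl; intro i _; push_cast; ring
    · simp

lemma foldl_mul_range (f : Nat → Int) (n : Nat) : ∀ (r : Int),
    (List.range n).foldl (fun r i => r * f i) r = r * ∏ i ∈ Finset.range n, f i := by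
  induction n with
  | zero => intro r; simp
  | succ n ih =>
    intro r
    rw [List.range_succ, List.foldl_append, Finset.prod_range_succ, ih]
    simp [mul_assoc]

lemma pvFall_eq (x : Int) (k : Nat) : pvFall x (k : Int) = pfall x k := by
  rw [pvFall, PySem.List.pyRange_one, List.foldl_map, pfall_eq_prod]
  have : ((k : Int) - 0).toNat = k := by omega
  rw [this, foldl_mul_range (fun i => x - (0 + (i:Int))) k]
  simp

lemma choose_sub_mul (j k : Nat) : (j - k) * j.choose k = j * (j-1).choose k := by
  cases j with
  | zero => simp
  | succ j' =>
    have h := Nat.choose_mul_succ_eq j' k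
    simp only [Nat.add_sub_cancel]
    rw [Nat.mul_comm (j'+1) (j'.choose k), h, Nat.mul_comm]

def pvF (n : Nat) (m : Int) (j : Nat) : Int :=
  ∑ k ∈ Finset.range (j+1), (-1 : ℤ)^k * (j.choose k : ℤ) * pfall (m - k) (n - k)

lemma pvF_pred (n : Nat) (m : Int) (j : Nat) :
    ∑ k ∈ Finset.range (j+1), (-1:ℤ)^k * ((j-1).choose k : ℤ) * pfall (m - k) (n - k)
      = pvF n m (j-1) := by
  cases j with
  | zero => rfl
  | succ j' =>
    simp only [Nat.add_sub_cancel, pvF]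
    rw [Finset.sum_range_succ]
    simp [Nat.choose_eq_zero_of_lt (Nat.lt_succ_self j')]

lemma pvR2 (n : Nat) (m : Int) (j : Nat) (hj : j ≤ n) :
    pvF (n+1) m j = (m - j) * pvF n (m-1) j + j * pvF n (m-1) (j-1) := by
  have key : ∀ k ∈ Finset.range (j+1),
      (-1:ℤ)^k * (j.choose k : ℤ) * pfall (m - k) (n+1 - k)
      = (m - j) * ((-1:ℤ)^k * (j.choose k : ℤ) * pfall (m-1 - k) (n - k))
        + (j:ℤ) * ((-1:ℤ)^k * ((j-1).choose k : ℤ) * pfall (m-1 - k) (n - k)) := by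
    intro k hk
    simp only [Finset.mem_range] at hk
    have hkj : k ≤ j := by omega
    have h1 : n + 1 - k = (n - k) + 1 := by omega
    rw [h1, pfall]
    have harg : m - (k:ℤ) - 1 = m - 1 - k := by ring
    rw [harg]
    have hc : ((j:ℤ) - k) * (j.choose k : ℤ) = (j:ℤ) * ((j-1).choose k : ℤ) := by
      have h := congrArg (fun t : ℕ => (t : ℤ)) (choose_sub_mul j k)
      push_cast [Nat.cast_sub hkj] at h
      exact h
    linear_combination ((-1:ℤ)^k * pfall (m - 1 - k) (n - k)) * hc
  rw [pvF, Finset.sum_congr rfl key, Finset.sum_add_distrib, ← Finset.mul_sum, ← Finset.mul_sum,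
    pvF_pred]
  rfl

lemma pvR1 (n j : Nat) (m : Int) :
    pvF (n+1) m (j+1) = pvF (n+1) m j - pvF n (m-1) j := by
  have hmid : pvF (n+1) m (j+1)
      = pfall m (n+1) + ∑ k ∈ Finset.range (j+1),
          (-1:ℤ)^(k+1) * ((j.choose k : ℤ) + (j.choose (k+1) : ℤ)) * pfall (m-1-k) (n-k) := by
    rw [pvF, Finset.sum_range_succ']
    rw [add_comm]
    congr 1
    · simp [pfall]
    · apply Finset.sum_congr rfl
      intro k _
      have h1 : n + 1 - (k+1) = n - k := by omega
      have h2 : m - ((k:ℤ)+1) = m - 1 - k := by ring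
      have h3 : ((j+1).choose (k+1) : ℤ) = (j.choose k : ℤ) + (j.choose (k+1) : ℤ) := by
        exact_mod_cast congrArg (Nat.cast (R := ℤ)) (Nat.choose_succ_succ j k)
      push_cast
      rw [h3, h2]
  have hr : pvF (n+1) m j
      = pfall m (n+1) + ∑ k ∈ Finset.range (j+1), (-1:ℤ)^(k+1) * (j.choose (k+1) : ℤ) * pfall (m-1-k) (n-k) := by
    rw [pvF, Finset.sum_range_succ']
    rw [add_comm]
    congr 1
    · simp [pfall]
    · rw [Finset.sum_range_succ, Nat.choose_eq_zero_of_lt (Nat.lt_succ_self j)]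
      simp only [Nat.cast_zero, mul_zero, zero_mul, add_zero]
      apply Finset.sum_congr rfl
      intro k _
      have h1 : n + 1 - (k+1) = n - k := by omega
      have h2 : m - ((k:ℤ)+1) = m - 1 - k := by ring
      push_cast
      rw [h2]
  have hs : pvF n (m-1) j
      = ∑ k ∈ Finset.range (j+1), (-1:ℤ)^k * (j.choose k : ℤ) * pfall (m-1-k) (n-k) := rfl
  rw [hmid, hr, hs]
  rw [add_sub_assoc, ← Finset.sum_sub_distrib]
  congr 1
  apply Finset.sum_congr rfl
  intro k _
  ring

lemma pvR2' (n j : Nat) (m : Int) (hj : j ≤ n) :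
    pvF (n+1) m (j+1) = (m - ((j:ℤ)+1)) * pvF n (m-1) j + j * pvF n (m-1) (j-1) := by
  rw [pvR1 n j m, pvR2 n m j hj]
  ring

def pvAvoids : List Int → List Int → Bool
  | [], _ => true
  | _ :: _, [] => true
  | a :: as, b :: bs => (a != b) && pvAvoids as bs

lemma countP_flatMap {α β : Type} (f : α → List β) (p : β → Bool) :
    ∀ (l : List α), (l.flatMap f).countP p = (l.map (fun x => (f x).countP p)).sum := by
  intro l
  induction l with
  | nil => rfl
  | cons x t ih => simp [List.flatMap_cons, List.countP_append, ih]

lemma sum_cast_map {α : Type} (g : α → ℕ) : ∀ (l : List α),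
    (((l.map g).sum : ℕ) : ℤ) = (l.map (fun x => (g x : ℤ))).sum := by
  intro l
  induction l with
  | nil => rfl
  | cons x t ih => simp only [List.map_cons, List.sum_cons, Nat.cast_add, ih]

lemma sum_const_int {α : Type} (c : ℤ) : ∀ (l : List α), (l.map (fun _ => c)).sum = l.length * c := by
  intro l
  induction l with
  | nil => simp
  | cons x t ih => simp [ih]; ring

lemma countP_split {α : Type} (p q : α → Bool) :
    ∀ (l : List α), l.countP (fun x => p x && q x) + l.countP (fun x => p x && !q x) = l.countP p := by
  intro l
  induction l with
  | nil => rfl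
  | cons x t ih =>
    simp only [List.countP_cons]
    cases hp : p x <;> cases hq : q x <;> simp [hp, hq] <;> omega

lemma countP_mem_comm (as pool : List Int) (ha : as.Nodup) (hp : pool.Nodup) :
    pool.countP (fun x => decide (x ∈ as)) = as.countP (fun x => decide (x ∈ pool)) := by
  rw [List.countP_eq_length_filter, List.countP_eq_length_filter]
  rw [← List.toFinset_card_of_nodup (List.Nodup.filter _ hp),
      ← List.toFinset_card_of_nodup (List.Nodup.filter _ ha)]
  rw [List.toFinset_filter, List.toFinset_filter]
  have h1 : pool.toFinset.filter (fun x => decide (x ∈ as)) = pool.toFinset ∩ as.toFinset := by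
    ext x; simp [Finset.mem_filter, List.mem_toFinset]
  have h2 : as.toFinset.filter (fun x => decide (x ∈ pool)) = as.toFinset ∩ pool.toFinset := by
    ext x; simp [Finset.mem_filter, List.mem_toFinset]
  rw [h1, h2, Finset.inter_comm]

lemma countP_erase (x : Int) (pool : List Int) (hp : pool.Nodup) (hx : x ∈ pool) :
    ∀ (as : List Int), as.Nodup →
      as.countP (fun y => decide (y ∈ pool.erase x))
        = if x ∈ as then as.countP (fun y => decide (y ∈ pool)) - 1
          else as.countP (fun y => decide (y ∈ pool)) := by
  intro as
  induction as with
  | nil => simp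
  | cons y t ih =>
    intro hnd
    rcases List.nodup_cons.mp hnd with ⟨hyt, hnt⟩
    have iht := ih hnt
    have hpos : x ∈ t → 0 < t.countP (fun y => decide (y ∈ pool)) :=
      fun hxt => List.countP_pos_iff.mpr ⟨x, hxt, by simp [hx]⟩
    have hme : y ∈ pool.erase x ↔ (y ≠ x ∧ y ∈ pool) := List.Nodup.mem_erase_iff hp
    simp only [List.countP_cons, decide_eq_true_eq, List.mem_cons, iht, hme]
    by_cases hyx : y = x <;> by_cases hxt : x ∈ t <;> by_cases hyp : y ∈ pool <;>
      simp [hyx, hxt, hyp, hyt, hx] <;>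
      first
      | omega
      | (exact absurd hxt (hyx ▸ hyt))
      | (have := hpos hxt; omega)
      | (exact absurd hx (hyx ▸ hyp))

lemma sum_ite3 (A B : ℤ) (a0 : Int) (as : List Int) :
    ∀ (l : List Int),
      (l.map (fun x => if a0 = x then 0 else if x ∈ as then A else B)).sum
        = (l.countP (fun x => !(a0 == x) && decide (x ∈ as)) : ℤ) * A
          + (l.countP (fun x => !(a0 == x) && !(decide (x ∈ as))) : ℤ) * B := by
  intro l
  induction l with
  | nil => simp
  | cons x t ih =>
    simp only [List.map_cons, List.sum_cons, ih, List.countP_cons]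
    by_cases h1 : a0 = x <;> by_cases h2 : x ∈ as <;> simp [h1, h2] <;> push_cast <;> ring

lemma pvPerms_mem (n : Nat) : ∀ (pool : List Int), pool.Nodup → ∀ a ∈ pvPermsR pool n,
    a.Nodup ∧ a.length = n ∧ ∀ x ∈ a, x ∈ pool := by
  induction n with
  | zero =>
    intro pool _ a ha
    simp only [pvPermsR, List.mem_singleton] at ha
    subst ha; simp
  | succ n ih =>
    intro pool hp a ha
    simp only [pvPermsR, List.mem_flatMap, List.mem_map] at ha
    obtain ⟨x, hx, p, hpmem, rfl⟩ := ha
    obtain ⟨hnd, hlen, hsub⟩ := ih (pool.erase x) (hp.erase x) p hpmem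
    have hxnot : x ∉ p := fun h => ((List.Nodup.mem_erase_iff hp).mp (hsub x h)).1 rfl
    refine ⟨List.nodup_cons.mpr ⟨hxnot, hnd⟩, by simp [hlen], ?_⟩
    intro y hy
    rcases List.mem_cons.mp hy with rfl | hy'
    · exact hx
    · exact List.mem_of_mem_erase (hsub y hy')

lemma pvPerms_length (n : Nat) : ∀ (pool : List Int), pool.Nodup →
    ((pvPermsR pool n).length : ℤ) = pfall (pool.length) n := by
  induction n with
  | zero => intro pool _; simp [pvPermsR, pfall]
  | succ n ih =>
    intro pool hp
    simp only [pvPermsR, List.length_flatMap]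
    rw [sum_cast_map]
    have hcong : ∀ x ∈ pool,
        ((((pvPermsR (pool.erase x) n).map (fun p => x :: p)).length : ℤ))
          = pfall ((pool.length : ℤ) - 1) n := by
      intro x hx
      rw [List.length_map, ih (pool.erase x) (hp.erase x),
        List.length_erase_of_mem hx]
      congr 1
      have : 1 ≤ pool.length := List.length_pos_iff.mpr (List.ne_nil_of_mem hx)
      omega
    calc (pool.map fun x => (((pvPermsR (pool.erase x) n).map (fun p => x :: p)).length : ℤ)).sum
        = (pool.map fun _ => pfall ((pool.length : ℤ) - 1) n).sum := by
          rw [List.map_congr_left hcong]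
      _ = pool.length * pfall ((pool.length : ℤ) - 1) n := sum_const_int _ pool
      _ = pfall (pool.length) (n+1) := by rw [pfall]

lemma countP_congr' {α : Type} {p q : α → Bool} {l : List α} (h : ∀ a ∈ l, p a = q a) :
    l.countP p = l.countP q :=
  List.countP_congr (fun a ha => by rw [h a ha])

lemma pvCount : ∀ (n : Nat) (pool a : List Int), pool.Nodup → a.Nodup → a.length = n →
    (((pvPermsR pool n).countP (fun b => pvAvoids a b)) : ℤ)
      = pvF n (pool.length) (a.countP (fun x => decide (x ∈ pool))) := by
  intro n
  induction n with
  | zero =>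
    intro pool a _ _ hlen
    rw [List.length_eq_zero_iff.mp hlen]
    simp [pvPermsR, pvAvoids, pvF, pfall, List.countP_cons]
  | succ n ih =>
    intro pool a hp ha hlen
    cases a with
    | nil => simp at hlen
    | cons a0 as =>
      rcases List.nodup_cons.mp ha with ⟨ha0, has⟩
      have hlen' : as.length = n := by simpa using hlen
      set m : ℤ := (pool.length : ℤ) with hm
      set jt : Nat := as.countP (fun x => decide (x ∈ pool)) with hjt
      have hjtn : jt ≤ n := by rw [hjt, ← hlen']; exact List.countP_le_length
      set A : ℤ := pvF n (m-1) (jt-1) with hA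
      set B : ℤ := pvF n (m-1) jt with hB
      have hcong : ∀ x ∈ pool,
          (((((pvPermsR (pool.erase x) n).map (fun p => x :: p)).countP
              (fun b => pvAvoids (a0 :: as) b)) : ℕ) : ℤ)
            = if a0 = x then 0 else if x ∈ as then A else B := by
        intro x hx
        have hlp : 1 ≤ pool.length := List.length_pos_iff.mpr (List.ne_nil_of_mem hx)
        rw [List.countP_map]
        by_cases hax : a0 = x
        · subst hax
          have hz : ∀ p', ((fun b => pvAvoids (a0 :: as) b) ∘ (fun p => a0 :: p)) p' = false := by
            intro p'; simp [pvAvoids]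
          simp only [if_pos rfl]
          rw [List.countP_eq_zero.mpr (fun p' _ => by rw [hz p']; exact (by simp))]
          simp
        · have he : ((fun b => pvAvoids (a0 :: as) b) ∘ (fun p => x :: p))
              = fun p' => pvAvoids as p' := by
            funext p'; simp [pvAvoids, Function.comp, bne_iff_ne, hax]
          rw [he, ih (pool.erase x) as (hp.erase x) has hlen',
            countP_erase x pool hp hx as has, List.length_erase_of_mem hx]
          have hc : ((pool.length - 1 : ℕ) : ℤ) = m - 1 := by omega
          rw [if_neg hax]
          by_cases hxas : x ∈ as
          · rw [if_pos hxas, if_pos hxas, hA, hc]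
          · rw [if_neg hxas, if_neg hxas, hB, hc]
      rw [pvPermsR, countP_flatMap, sum_cast_map, List.map_congr_left hcong, sum_ite3]
      set c1 : Nat := pool.countP (fun x => !(a0 == x) && decide (x ∈ as)) with hc1
      set c2 : Nat := pool.countP (fun x => !(a0 == x) && !(decide (x ∈ as))) with hc2
      have hsplit : c1 + c2 = pool.countP (fun x => !(a0 == x)) :=
        countP_split (fun x => !(a0 == x)) (fun x => decide (x ∈ as)) pool
      have hlencount : pool.length = pool.countP (fun x => (a0 == x))
          + pool.countP (fun x => !(a0 == x)) := by
        rw [List.length_eq_countP_add_countP (p := fun x => (a0 == x)) (l := pool)]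
        congr 1
        apply countP_congr'
        intro x _; cases h : (a0 == x) <;> simp [h]
      have hc1jt : c1 = jt := by
        rw [hc1]
        have : ∀ x ∈ pool, (!(a0 == x) && decide (x ∈ as)) = decide (x ∈ as) := by
          intro x _
          by_cases hxas : x ∈ as
          · have : ¬ (a0 = x) := fun h => ha0 (h ▸ hxas)
            simp [hxas, this]
          · simp [hxas]
        rw [countP_congr' this, countP_mem_comm as pool has hp]
      have hcnt : pool.countP (fun x => (a0 == x)) = if a0 ∈ pool then 1 else 0 := by
        have hflip : ∀ x ∈ pool, ((a0 == x) : Bool) = (x == a0) := by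
          intro x _; exact Bool.decide_congr ⟨Eq.symm, Eq.symm⟩
        rw [countP_congr' hflip]
        by_cases hmem : a0 ∈ pool
        · rw [if_pos hmem, ← List.count, List.count_eq_one_of_mem hp hmem]
        · rw [if_neg hmem, ← List.count, List.count_eq_zero_of_not_mem hmem]
      simp only [List.countP_cons]
      by_cases hmem : a0 ∈ pool
      · have hj : as.countP (fun x => decide (x ∈ pool)) + (if decide (a0 ∈ pool) = true then 1 else 0) = jt + 1 := by
          simp [hmem, hjt]
        rw [hj, pvR2' n jt m hjtn]
        have hcc2 : (c2 : ℤ) = m - 1 - jt := by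
          rw [hcnt, if_pos hmem] at hlencount; omega
        rw [hc1jt, hcc2, ← hA, ← hB]
        ring
      · have hj : as.countP (fun x => decide (x ∈ pool)) + (if decide (a0 ∈ pool) = true then 1 else 0) = jt := by
          simp [hmem, hjt]
        rw [hj, pvR2 n m jt hjtn]
        have hcc2 : (c2 : ℤ) = m - jt := by
          rw [hcnt, if_neg hmem] at hlencount; omega
        rw [hc1jt, hcc2, ← hA, ← hB]
        ring

lemma allDiff_aux : ∀ (n : Nat) (a b : List Int), a.length = n → b.length = n →
    ((List.range n).all (fun k => !(a.getD k 0 == b.getD k 0))) = pvAvoids a b := by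
  intro n
  induction n with
  | zero =>
    intro a b ha hb
    rw [List.length_eq_zero_iff.mp ha, List.length_eq_zero_iff.mp hb]
    rfl
  | succ n ih =>
    intro a b ha hb
    cases a with
    | nil => simp at ha
    | cons a0 as =>
      cases b with
      | nil => simp at hb
      | cons b0 bs =>
        rw [List.range_succ_eq_map, List.all_cons, List.all_map]
        simp only [Function.comp_def, List.getD_cons_succ, List.getD_cons_zero]
        rw [ih as bs (by simpa using ha) (by simpa using hb)]
        simp [pvAvoids, bne]

lemma pvAllDiff_eq (n : Nat) (a b : List Int) (ha : a.length = n) (hb : b.length = n) :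
    pvAllDiff a b (n : ℤ) = pvAvoids a b := by
  rw [pvAllDiff, PySem.List.pyRange_one, List.all_map]
  have h2 : (((n:ℤ) - 0).toNat) = n := by omega
  rw [h2]
  simp only [Function.comp_def, zero_add, PySem.List.pyGetD_natCast]
  exact allDiff_aux n a b ha hb

lemma pfall_cast_of_le (a : Nat) : ∀ (b : Nat), b ≤ a → pfall (a:ℤ) b = ((a.descFactorial b : ℕ) : ℤ) := by
  intro b
  induction b with
  | zero => intro _; simp [pfall]
  | succ b ih =>
    intro hb
    rw [pfall_eq_prod, Finset.prod_range_succ, ← pfall_eq_prod, ih (by omega),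
      Nat.descFactorial_succ]
    have h1 : ((a - b : ℕ) : ℤ) = (a:ℤ) - b := by omega
    push_cast [h1]
    ring

lemma list_sum_range (f : Nat → ℤ) (n : Nat) :
    ((List.range n).map f).sum = ∑ k ∈ Finset.range n, f k := by
  induction n with
  | zero => simp
  | succ n ih => rw [List.range_succ, List.map_append, List.sum_append, Finset.sum_range_succ, ih]; simp

lemma pfall_zero_of_lt : ∀ (n a : Nat), a < n → pfall (a:ℤ) n = 0 := by
  intro n
  induction n with
  | zero => intro a h; omega
  | succ n ih =>
    intro a h
    rw [pfall]
    cases a with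
    | zero => simp
    | succ a =>
      have : ((a + 1 : ℕ) : ℤ) - 1 = ((a : ℕ) : ℤ) := by push_cast; ring
      rw [this, ih a (by omega)]
      ring

lemma blute_alt_eq (N M : Int) (h : 0 ≤ N) :
    blute_alt N M = pfall ((M.toNat : ℤ)) N.toNat * pvF N.toNat ((M.toNat : ℤ)) N.toNat := by
  set n := N.toNat with hn
  have hN : N = (n : ℤ) := by omega
  rw [blute_alt]
  have hm : (if M > 0 then M else 0) = ((M.toNat : ℤ)) := by split_ifs <;> omega
  simp only [hm]
  by_cases hbig : N > ((M.toNat : ℕ) : ℤ)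
  · rw [if_pos hbig, pfall_zero_of_lt n M.toNat (by omega), zero_mul]
  rw [if_neg hbig]
  congr 1
  · rw [hN, pvFall_eq]
  · rw [PySem.List.foldl_add]
    have h1 : ((N + 1) - 0).toNat = n + 1 := by omega
    rw [PySem.List.pyRange_one, h1, List.map_map, list_sum_range]
    rw [pvF, zero_add]
    apply Finset.sum_congr rfl
    intro k hk
    have hkn : k ≤ n := by simpa [Nat.lt_succ_iff] using hk
    simp only [Function.comp_def, zero_add]
    have e1 : ((k:ℤ)).toNat = k := by omega
    have e2 : pvFall N (k:ℤ) = ((n.descFactorial k : ℕ) : ℤ) := by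
      rw [hN, pvFall_eq, pfall_cast_of_le n k hkn]
    have e3 : pvFall (k:ℤ) (k:ℤ) = ((k.factorial : ℕ) : ℤ) := by
      rw [pvFall_eq, pfall_cast_of_le k k le_rfl, Nat.descFactorial_self]
    have e4 : N - (k:ℤ) = ((n - k : ℕ) : ℤ) := by omega
    rw [e1, e2, e3, PySem.Int.floordiv_natCast, ← Nat.choose_eq_descFactorial_div_factorial,
      e4, pvFall_eq]

lemma blute_eq (N M : Int) (h : 0 ≤ N) :
    blute N M = pfall ((M.toNat : ℤ)) N.toNat * pvF N.toNat ((M.toNat : ℤ)) N.toNat := by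
  set n := N.toNat with hn
  have hN : N = (n : ℤ) := by omega
  rw [blute]
  have hnd : (PySem.List.pyRange 0 M 1).Nodup := PySem.List.nodup_pyRange_one 0 M
  have hlen : (PySem.List.pyRange 0 M 1).length = M.toNat := by
    rw [PySem.List.length_pyRange_one]; omega
  set nums := PySem.List.pyRange 0 M 1
  rw [pvPerms_eq n nums]
  set ps := pvPermsR nums n with hps
  have hmem := pvPerms_mem n nums hnd
  have step1 : ps.foldl (fun count a =>
      ps.foldl (fun count b => if pvAllDiff a b N then count + 1 else count) count) 0
      = ps.foldl (fun count a => count + ((ps.countP (fun b => pvAllDiff a b N) : ℕ) : ℤ)) 0 := by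
    apply PySem.List.foldl_congr_mem
    intro acc a _
    exact PySem.List.foldl_if_add_one _ _ _
  rw [step1, PySem.List.foldl_add]
  have step2 : ∀ a ∈ ps, (((ps.countP (fun b => pvAllDiff a b N)) : ℕ) : ℤ)
      = pvF n ((M.toNat : ℤ)) n := by
    intro a ha
    obtain ⟨hand, halen, hasub⟩ := hmem a ha
    have hcp : ps.countP (fun b => pvAllDiff a b N) = ps.countP (fun b => pvAvoids a b) := by
      apply countP_congr'
      intro b hb
      obtain ⟨_, hblen, _⟩ := hmem b hb
      rw [hN, pvAllDiff_eq n a b halen hblen]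
    rw [hcp, hps, pvCount n nums a hnd hand halen]
    have hja : a.countP (fun x => decide (x ∈ nums)) = n := by
      rw [List.countP_eq_length.mpr (fun x hx => by simpa using hasub x hx), halen]
    rw [hja, hlen]
  rw [List.map_congr_left step2, zero_add, sum_const_int (pvF n ((M.toNat:ℕ) : ℤ) n) ps, hps,
    pvPerms_length n nums hnd, hlen]

-- ===== VERDICT (by name: the statement is the Claim_ definition above) =====
theorem blute_spec : Claim_equal_blute := by
  intro N M _ hpre
  unfold Pre_blute at hpre
  unfold Spec_blute
  rw [blute_eq N M hpre, blute_alt_eq N M hpre]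

@[simp] theorem blute_raises : Claim_raises_blute := by
  unfold Claim_raises_blute
  exact ⟨fun N M _ h hpre => absurd hpre (by unfold Pre_blute Raises_blute at *; omega), by decide⟩
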